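-- pv_equiv track=rewrite | github.com/Viktor-Bubanja/Pretty-Good-Diff | src/str_diff.py | _calculate_substrings
-- ===== SOURCE A (Python) =====
-- def _calculate_substrings(string, substring_indexes):
--     substrings = []
--     lowest_index = 0
--     highest_index = len(string) - 1
--     for indexes in substring_indexes:
--         non_matched_substring = string[lowest_index : indexes[0]]
--         substrings.append(non_matched_substring)
--         lowest_index = indexes[-1] + 1
--
--         matched_substring = string[indexes[0] : indexes[-1] + 1]
--         substrings.append(matched_substring)
--     if indexes[-1] < highest_index:
--         substrings.append(string[indexes[-1] + 1 : highest_index + 1])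
--     return substrings
-- ===== SOURCE B (Python) =====
-- def _calculate_substrings(string, substring_indexes):
--     boundaries = [0]
--     for indexes in substring_indexes:
--         boundaries.append(indexes[0])
--         boundaries.append(indexes[-1] + 1)
--     if indexes[-1] < len(string) - 1:
--         boundaries.append(len(string))
--     return [string[boundaries[i] : boundaries[i + 1]] for i in range(len(boundaries) - 1)]
-- ===== Notes on version B (the rewrite author's own statement) =====
-- stated objective: alternative
-- what changed: A slices while looping with a running lowest_index accumulator; B first builds a flat list of boundary positions ([0] plus each group's start and end+1, plus len(string) for the trailing piece) and then produces all pieces in one comprehension slicing between consecutive boundaries.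
import Mathlib
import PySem

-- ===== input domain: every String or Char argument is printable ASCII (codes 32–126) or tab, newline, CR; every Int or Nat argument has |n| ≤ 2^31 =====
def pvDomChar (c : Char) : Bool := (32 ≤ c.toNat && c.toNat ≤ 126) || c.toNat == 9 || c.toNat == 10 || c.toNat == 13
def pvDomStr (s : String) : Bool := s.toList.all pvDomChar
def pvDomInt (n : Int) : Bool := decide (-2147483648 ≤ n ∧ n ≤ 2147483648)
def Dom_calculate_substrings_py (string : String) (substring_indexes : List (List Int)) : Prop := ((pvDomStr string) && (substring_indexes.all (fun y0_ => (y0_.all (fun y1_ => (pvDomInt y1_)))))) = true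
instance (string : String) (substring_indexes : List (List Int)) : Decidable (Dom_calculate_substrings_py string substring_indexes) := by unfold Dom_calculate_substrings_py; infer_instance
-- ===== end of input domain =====

-- B replaces A's running-accumulator loop (slicing as it goes) by a flat boundaries list
-- built first and a comprehension slicing between consecutive boundaries (objective: alternative decomposition, same cost).

-- ===== PORT A =====
-- literal transliteration of A: loop state = (substrings, lowest_index, last loop variable `indexes`);
-- indexes[0] / indexes[-1] via PySem.List.pyGet? (.getD 0 unreachable under Pre_, which demands nonempty inner lists);
-- the `none` branch is Python's UnboundLocalError on empty substring_indexes, excluded by Pre_.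
def calculate_substrings_py (string : String) (substring_indexes : List (List Int)) : List String :=
  let highest_index : Int := PySem.Str.len string - 1
  let st := substring_indexes.foldl
    (fun (st : List String × Int × Option (List Int)) indexes =>
      let i0 := (PySem.List.pyGet? indexes 0).getD 0
      let iL := (PySem.List.pyGet? indexes (-1)).getD 0
      (st.1 ++ [PySem.Str.slice string (some st.2.1) (some i0),
                PySem.Str.slice string (some i0) (some (iL + 1))],
       iL + 1, some indexes))
    ([], 0, none)
  match st.2.2 with
  | none => []
  | some indexes =>
    let iL := (PySem.List.pyGet? indexes (-1)).getD 0
    if iL < highest_index then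
      st.1 ++ [PySem.Str.slice string (some (iL + 1)) (some (highest_index + 1))]
    else st.1

-- ===== PORT B =====
-- literal transliteration of B (Source B): build boundaries = [0] ++ [g[0], g[-1]+1 for each group]
-- (+ len(string) if the leaked last group ends early), then slice between consecutive boundaries;
-- boundaries[i] via pyGetD (the index is always in range); `none` branch = UnboundLocalError, outside Pre_.
def calculate_substrings_py_alt (string : String) (substring_indexes : List (List Int)) : List String :=
  let st := substring_indexes.foldl
    (fun (st : List Int × Option (List Int)) indexes =>
      (st.1 ++ [(PySem.List.pyGet? indexes 0).getD 0,
                (PySem.List.pyGet? indexes (-1)).getD 0 + 1], some indexes))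
    ([0], none)
  match st.2 with
  | none => []
  | some indexes =>
    let boundaries :=
      if (PySem.List.pyGet? indexes (-1)).getD 0 < PySem.Str.len string - 1 then
        st.1 ++ [PySem.Str.len string]
      else st.1
    (PySem.List.pyRange 0 ((boundaries.length : Int) - 1) 1).map
      (fun i => PySem.Str.slice string
        (some (PySem.List.pyGetD boundaries i 0))
        (some (PySem.List.pyGetD boundaries (i + 1) 0)))

-- ===== PRECONDITION & SPEC =====
-- Pre_ excludes exactly the inputs where Python A raises: an empty substring_indexes
-- (UnboundLocalError on the leaked loop variable) and any empty inner list (IndexError on indexes[0]).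
def Pre_calculate_substrings_py (string : String) (substring_indexes : List (List Int)) : Prop :=
  substring_indexes ≠ [] ∧ ∀ l ∈ substring_indexes, l ≠ []
instance (string : String) (substring_indexes : List (List Int)) : Decidable (Pre_calculate_substrings_py string substring_indexes) := by unfold Pre_calculate_substrings_py; infer_instance
def pvWitness_calculate_substrings_py : String × List (List Int) := ("abcdef", [[1, 2], [4]])

def Spec_calculate_substrings_py (string : String) (substring_indexes : List (List Int)) (out : List String) : Prop := out = calculate_substrings_py_alt string substring_indexes
instance (string : String) (substring_indexes : List (List Int)) (out : List String) : Decidable (Spec_calculate_substrings_py string substring_indexes out) := by unfold Spec_calculate_substrings_py; infer_instance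

-- ===== CLAIM (what is proved, stated in full; the proofs are below) =====
def Claim_equal_calculate_substrings_py : Prop := ∀ (string : String) (substring_indexes : List (List Int)), Dom_calculate_substrings_py string substring_indexes → Pre_calculate_substrings_py string substring_indexes → Spec_calculate_substrings_py string substring_indexes (calculate_substrings_py string substring_indexes)

-- ===== LEMMAS AND PROOFS =====

def pvG0 (g : List Int) : Int := (PySem.List.pyGet? g 0).getD 0
def pvGL (g : List Int) : Int := (PySem.List.pyGet? g (-1)).getD 0
def pvFlat (gs : List (List Int)) : List Int := gs.flatMap (fun g => [pvG0 g, pvGL g + 1])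
def pvPieces (s : String) : List Int → List String
  | a :: b :: rest => PySem.Str.slice s (some a) (some b) :: pvPieces s (b :: rest)
  | _ => []

theorem foldA_eq (s : String) (gs : List (List Int)) (acc : List String) (b0 : Int)
    (w : Option (List Int)) :
    gs.foldl
      (fun (st : List String × Int × Option (List Int)) indexes =>
        let i0 := (PySem.List.pyGet? indexes 0).getD 0
        let iL := (PySem.List.pyGet? indexes (-1)).getD 0
        (st.1 ++ [PySem.Str.slice s (some st.2.1) (some i0),
                  PySem.Str.slice s (some i0) (some (iL + 1))],
         iL + 1, some indexes))
      (acc, b0, w)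
    = (acc ++ pvPieces s (b0 :: pvFlat gs),
       (b0 :: (pvFlat gs)).getLast (by simp),
       (gs.getLast?.map some).getD w) := by
  induction gs generalizing acc b0 w with
  | nil => simp [pvFlat, pvPieces]
  | cons g gs ih =>
    simp only [List.foldl_cons, ih]
    cases gs with
    | nil => simp [pvFlat, pvPieces, pvG0, pvGL]
    | cons h t => simp [pvFlat, pvPieces, pvG0, pvGL, List.getLast?_cons]

theorem foldB_eq (gs : List (List Int)) (bs : List Int) (w : Option (List Int)) :
    gs.foldl
      (fun (st : List Int × Option (List Int)) indexes =>
        (st.1 ++ [(PySem.List.pyGet? indexes 0).getD 0,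
                  (PySem.List.pyGet? indexes (-1)).getD 0 + 1], some indexes))
      (bs, w)
    = (bs ++ pvFlat gs, (gs.getLast?.map some).getD w) := by
  induction gs generalizing bs w with
  | nil => simp [pvFlat]
  | cons g gs ih =>
    simp only [List.foldl_cons, ih]
    cases gs with
    | nil => simp [pvFlat, pvG0, pvGL]
    | cons h t => simp [pvFlat, pvG0, pvGL, List.getLast?_cons]

theorem pieces_append (s : String) (bs : List Int) (a x : Int) :
    pvPieces s (a :: bs ++ [x])
      = pvPieces s (a :: bs) ++ [PySem.Str.slice s (some ((a :: bs).getLast (by simp))) (some x)] := by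
  induction bs generalizing a with
  | nil => simp [pvPieces]
  | cons b bs ih =>
    have h := ih b
    simp only [List.cons_append] at h
    simp only [List.cons_append, pvPieces, h]
    simp [List.getLast_cons]

theorem natmap_eq_pieces (s : String) (l : List Int) :
    (List.range (l.length - 1)).map
      (fun k => PySem.Str.slice s (some (l.getD k 0)) (some (l.getD (k + 1) 0)))
    = pvPieces s l := by
  induction l with
  | nil => simp [pvPieces]
  | cons a bs ih =>
    cases bs with
    | nil => simp [pvPieces]
    | cons b t =>
      have h1 : (a :: b :: t).length - 1 = t.length + 1 := by simp
      rw [h1, List.range_succ_eq_map, List.map_cons, List.map_map]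
      have h2 : (b :: t).length - 1 = t.length := by simp
      rw [pvPieces, ← ih, h2]
      simp [Function.comp]

theorem comp_eq_pieces (s : String) (a : Int) (bs : List Int) :
    (PySem.List.pyRange 0 (((a :: bs).length : Int) - 1) 1).map
      (fun i => PySem.Str.slice s
        (some (PySem.List.pyGetD (a :: bs) i 0))
        (some (PySem.List.pyGetD (a :: bs) (i + 1) 0)))
    = pvPieces s (a :: bs) := by
  rw [PySem.List.pyRange_one]
  have hlen : ((((a :: bs).length : Int) - 1) - 0).toNat = (a :: bs).length - 1 := by
    simp
  rw [hlen, List.map_map]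
  rw [← natmap_eq_pieces s (a :: bs)]
  apply List.map_congr_left
  intro k hk
  simp only [Function.comp, zero_add, ← Nat.cast_succ, PySem.List.pyGetD_natCast]

theorem pvFlat_cons (g : List Int) (gs : List (List Int)) :
    pvFlat (g :: gs) = pvG0 g :: (pvGL g + 1) :: pvFlat gs := by
  simp [pvFlat]

theorem flat_getLast (gs : List (List Int)) (h : gs ≠ []) (a : Int) :
    (a :: pvFlat gs).getLast (List.cons_ne_nil a _) = pvGL (gs.getLast h) + 1 := by
  induction gs generalizing a with
  | nil => exact absurd rfl h
  | cons g t ih =>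
    rw [pvFlat_cons]
    cases t with
    | nil => simp [pvFlat, List.getLast]
    | cons g2 t2 =>
      have hne2 : (g2 :: t2 : List (List Int)) ≠ [] := by simp
      have h2 := ih hne2 (pvGL g + 1)
      rw [List.getLast_cons (by simp), List.getLast_cons (by simp [pvFlat_cons]),
          List.getLast_cons hne2]
      exact h2

-- ===== VERDICT (by name: the statement is the Claim_ definition above) =====
theorem calculate_substrings_py_spec : Claim_equal_calculate_substrings_py := by
  intro s gs _ hpre
  obtain ⟨hne, -⟩ := hpre
  unfold Spec_calculate_substrings_py calculate_substrings_py calculate_substrings_py_alt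
  rw [foldA_eq, foldB_eq]
  have hgl : gs.getLast? = some (gs.getLast hne) := List.getLast?_eq_some_getLast hne
  simp only [hgl, Option.map_some, Option.getD_some, List.nil_append]
  by_cases hc : ((PySem.List.pyGet? (gs.getLast hne) (-1)).getD 0) < PySem.Str.len s - 1
  · simp only [if_pos hc]
    have hb : ([0] ++ pvFlat gs ++ [PySem.Str.len s] : List Int)
        = 0 :: (pvFlat gs ++ [PySem.Str.len s]) := by simp
    rw [hb, comp_eq_pieces]
    have hp := pieces_append s (pvFlat gs) 0 (PySem.Str.len s)
    simp only [List.cons_append] at hp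
    rw [hp, flat_getLast gs hne 0]
    have hlen1 : PySem.Str.len s - 1 + 1 = PySem.Str.len s := by ring
    rw [hlen1]
    simp [pvGL]
  · simp only [if_neg hc]
    have hb : ([0] ++ pvFlat gs : List Int) = 0 :: pvFlat gs := by simp
    rw [hb, comp_eq_pieces]
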